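-- pv_equiv track=rewrite | github.com/michalz1mniak/Matury | czerwiec2024/rozwiazania/zadanie3/3_3.py | czy
-- ===== SOURCE A (Python) =====
-- def czy(slowo):
--     for litera in slowo:
--         ile = 0
--         for i in range(len(slowo)):
--             if litera == slowo[i]:
--                 ile+=1
--         if ile>len(slowo)/2:
--             return True
--     return False
-- ===== SOURCE B (Python) =====
-- def czy(slowo):
--     # Boyer-Moore majority vote: one pass to find a candidate, one pass to verify.
--     count = 0
--     candidate = None
--     for ch in slowo:
--         if count == 0:
--             candidate = ch
--             count = 1
--         elif ch == candidate:
--             count += 1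
--         else:
--             count -= 1
--     if candidate is None:
--         return False
--     occ = 0
--     for ch in slowo:
--         if ch == candidate:
--             occ += 1
--     return occ > len(slowo) / 2
-- ===== Notes on version B (the rewrite author's own statement) =====
-- stated objective: faster
-- what changed: Replaces A's quadratic scan (counting every character's occurrences with a nested index loop) by the Boyer-Moore majority vote: one candidate/balance pass plus one verification pass.
import Mathlib
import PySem

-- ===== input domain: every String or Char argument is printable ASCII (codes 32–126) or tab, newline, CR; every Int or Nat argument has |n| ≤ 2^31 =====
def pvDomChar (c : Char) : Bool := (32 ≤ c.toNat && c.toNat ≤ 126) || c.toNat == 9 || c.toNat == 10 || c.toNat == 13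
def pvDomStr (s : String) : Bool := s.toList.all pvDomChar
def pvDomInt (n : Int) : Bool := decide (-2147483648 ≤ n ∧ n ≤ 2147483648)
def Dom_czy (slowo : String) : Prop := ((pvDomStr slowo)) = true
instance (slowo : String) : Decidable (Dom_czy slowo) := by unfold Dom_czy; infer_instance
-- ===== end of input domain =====

-- B replaces A's quadratic nested-scan majority check by the linear Boyer-Moore
-- majority vote (candidate pass + verification pass); proved to return the same Bool.


-- ===== PORT A =====
-- outer 'for litera in slowo' with early return; inner 'for i in range(len(slowo))'
-- counts slowo[i] == litera; 'ile > len(slowo)/2' on ints is exactly '2*ile > len'.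
def czyLoop (cs : List Char) (n : Int) : List Char → Bool
  | [] => false
  | litera :: rest =>
    let ile : Int := (PySem.List.pyRange 0 n 1).foldl
      (fun acc i => if litera = PySem.List.pyGetD cs i ' ' then acc + 1 else acc) 0
    if 2 * ile > n then true else czyLoop cs n rest

def czy (slowo : String) : Bool :=
  czyLoop slowo.toList (slowo.toList.length : Int) slowo.toList

-- ===== PORT B =====
-- Boyer-Moore vote step: (candidate, count) updated per character.
def bmStep (st : Option Char × Int) (ch : Char) : Option Char × Int :=
  if st.2 = 0 then (some ch, 1)
  else if some ch = st.1 then (st.1, st.2 + 1)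
  else (st.1, st.2 - 1)

def czy_alt (slowo : String) : Bool :=
  let cs := slowo.toList
  let st := cs.foldl bmStep (none, 0)
  match st.1 with
  | none => false
  | some cand =>
    let occ : Int := cs.foldl (fun a ch => if ch = cand then a + 1 else a) 0
    decide (2 * occ > (cs.length : Int))

-- ===== PRECONDITION & SPEC =====
def Spec_czy (slowo : String) (out : Bool) : Prop := out = czy_alt slowo
instance (slowo : String) (out : Bool) : Decidable (Spec_czy slowo out) := by unfold Spec_czy; infer_instance

-- ===== CLAIM (what is proved, stated in full; the proofs are below) =====
def Claim_equal_czy : Prop := ∀ (slowo : String), Dom_czy slowo → Spec_czy slowo (czy slowo)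

-- ===== LEMMAS AND PROOFS =====

-- counting fold = List.count
theorem countFold (x : Char) (cs : List Char) (acc : Int) :
    cs.foldl (fun a ch => if ch = x then a + 1 else a) acc = acc + (cs.count x : Int) := by
  induction cs generalizing acc with
  | nil => simp
  | cons c rest ih =>
    simp only [List.foldl_cons, List.count_cons, ih]
    by_cases h : c = x <;> simp [h] <;> push_cast <;> ring

-- A's inner loop computes the count of litera in cs
theorem innerCount (cs : List Char) (litera : Char) :
    (PySem.List.pyRange 0 (cs.length : Int) 1).foldl
      (fun acc i => if litera = PySem.List.pyGetD cs i ' ' then acc + 1 else acc) (0 : Int)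
      = (cs.count litera : Int) := by
  rw [PySem.List.foldl_pyRange_zero_pyGetD' cs ' '
      (fun acc ch => if litera = ch then acc + 1 else acc) 0]
  have hf : (fun (acc : Int) ch => if litera = ch then acc + 1 else acc)
      = (fun (a : Int) ch => if ch = litera then a + 1 else a) := by
    funext a ch
    by_cases h : ch = litera
    · simp [h]
    · rw [if_neg (fun he => h he.symm), if_neg h]
  rw [hf, countFold, zero_add]

-- A's outer loop is an 'any' over the majority predicate
theorem czyLoop_any (cs xs : List Char) :
    czyLoop cs (cs.length : Int) xs
      = xs.any (fun c => decide (2 * (cs.count c : Int) > (cs.length : Int))) := by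
  induction xs with
  | nil => simp [czyLoop]
  | cons c rest ih =>
    simp only [czyLoop, innerCount, List.any_cons, ih]
    by_cases h : 2 * (cs.count c : Int) > (cs.length : Int) <;> simp [h]

-- Boyer-Moore invariant
def BMInv (cs : List Char) (st : Option Char × Int) : Prop :=
  0 ≤ st.2 ∧ (st.1 = none → cs = []) ∧
  (∀ x, 2 * (cs.count x : Int) ≤ (cs.length : Int) + st.2) ∧
  (∀ x, st.1 ≠ some x → 2 * (cs.count x : Int) ≤ (cs.length : Int) - st.2)

theorem inv_foldl (cs : List Char) : BMInv cs (cs.foldl bmStep (none, 0)) := by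
  induction cs using List.reverseRecOn with
  | nil => refine ⟨le_refl 0, fun _ => rfl, ?_, ?_⟩ <;> intro x <;> simp
  | append_singleton p a ih =>
    rw [List.foldl_append]
    simp only [List.foldl_cons, List.foldl_nil]
    obtain ⟨hk0, hnone, ha, hb⟩ := ih
    set st := p.foldl bmStep (none, 0) with hst
    have hcnt : ∀ x : Char, ((p ++ [a]).count x : Int)
        = (p.count x : Int) + (if a = x then 1 else 0) := by
      intro x
      rw [List.count_append]
      by_cases h : a = x
      · simp [h]
      · rw [if_neg h]
        have : [a].count x = 0 := by simp [h]
        omega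
    have hlen : (((p ++ [a]).length : Nat) : Int) = (p.length : Int) + 1 := by
      simp
    simp only [bmStep]
    by_cases hz : st.2 = 0
    · -- count hit zero: new candidate a with count 1
      rw [if_pos hz]
      refine ⟨by norm_num, fun h => by simp at h, ?_, ?_⟩
      · intro x
        have := ha x
        rw [hcnt x, hlen]
        by_cases h : a = x <;> simp only [if_pos, if_neg, h, if_true, if_false] <;> omega
      · intro x hx
        have hax : a ≠ x := by intro h; exact hx (by simp [h])
        have := ha x
        rw [hcnt x, hlen]
        rw [if_neg hax]
        omega
    · have hpos : 0 < st.2 := lt_of_le_of_ne hk0 (Ne.symm hz)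
      have hsome : ∃ c, st.1 = some c := by
        cases h1 : st.1 with
        | none =>
          exfalso
          have := hnone h1
          rw [this] at hst
          simp [hst] at hz
        | some c => exact ⟨c, rfl⟩
      obtain ⟨cand, hcand⟩ := hsome
      by_cases heq : some a = st.1
      · -- same as candidate: count+1
        rw [if_neg hz, if_pos heq]
        have hac : a = cand := by rw [hcand] at heq; exact (Option.some_injective _ heq.symm).symm
        refine ⟨by omega, fun h => by rw [hcand] at h; simp at h, ?_, ?_⟩
        · intro x
          have := ha x
          rw [hcnt x, hlen]
          by_cases h : a = x <;> simp only [h, if_true, if_false, if_pos, if_neg] <;> omega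
        · intro x hx
          rw [hcand] at hx
          have := hb x (by rw [hcand]; exact hx)
          have hax : a ≠ x := by rw [hac]; intro h; exact hx (by rw [h])
          rw [hcnt x, hlen, if_neg hax]
          omega
      · -- different from candidate: count-1
        rw [if_neg hz, if_neg heq]
        refine ⟨by omega, fun h => by rw [hcand] at h; simp at h, ?_, ?_⟩
        · intro x
          rw [hcnt x, hlen]
          by_cases hxc : st.1 = some x
          · -- x is the candidate, so x ≠ a : count unchanged
            have hax : a ≠ x := by
              intro h; exact heq (by rw [h, hxc])
            have := ha x
            rw [if_neg hax]
            omega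
          · have := hb x hxc
            by_cases h : a = x <;> simp only [h, if_true, if_false, if_pos, if_neg] <;> omega
        · intro x hx
          have hxc : st.1 ≠ some x := by rw [hcand] at hx ⊢; exact hx
          have := hb x hxc
          rw [hcnt x, hlen]
          by_cases h : a = x <;> simp only [h, if_true, if_false, if_pos, if_neg] <;> omega

-- ===== VERDICT (by name: the statement is the Claim_ definition above) =====
theorem czy_spec : Claim_equal_czy := by
  intro slowo _
  unfold Spec_czy czy
  simp only [czy_alt]
  set cs := slowo.toList with hcs
  obtain ⟨hk0, hnone, ha, hb⟩ := inv_foldl cs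
  rw [czyLoop_any]
  cases h1 : (cs.foldl bmStep (none, 0)).1 with
  | none =>
    have : cs = [] := hnone h1
    simp [this, h1]
  | some cand =>
    simp only [h1, countFold, zero_add]
    by_cases hmaj : 2 * (cs.count cand : Int) > (cs.length : Int)
    · -- majority exists: A's any finds it too
      have hmem : cand ∈ cs := by
        rw [← List.count_pos_iff]
        by_contra h
        have h0 : cs.count cand = 0 := by omega
        rw [h0] at hmaj
        have : (0:Int) ≤ (cs.length : Int) := by positivity
        simp at hmaj
        omega
      have hany : cs.any (fun c => decide (2 * (cs.count c : Int) > (cs.length : Int))) = true := by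
        rw [List.any_eq_true]
        exact ⟨cand, hmem, by simpa using hmaj⟩
      rw [hany]
      simp [hmaj]
    · -- no char is a majority: both false
      have hall : ∀ c ∈ cs, ¬ (2 * (cs.count c : Int) > (cs.length : Int)) := by
        intro c _ hc
        by_cases hcc : c = cand
        · exact hmaj (hcc ▸ hc)
        · have := hb c (by rw [h1]; simp only [ne_eq, Option.some.injEq]; exact fun he => hcc he.symm)
          omega
      have hany : cs.any (fun c => decide (2 * (cs.count c : Int) > (cs.length : Int))) = false := by
        rw [List.any_eq_false]
        intro c hc
        simpa using hall c hc
      rw [hany]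
      simp [hmaj]
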